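-- pv_equiv track=rewrite | github.com/David-C-Ross/Compression-Project | Code/lz77.py | repeating_length_from_start
-- ===== SOURCE A (Python) =====
-- def repeating_length_from_start(window, input_string):
--     """Get the maximum repeating length of the input from the start of the window"""
--     if window == "" or input_string == "":
--         return 0
--
--     if window[0] == input_string[0]:
--         return 1 + repeating_length_from_start(
--             window[1:] + input_string[0], input_string[1:]
--         )
--     else:
--         return 0
-- ===== SOURCE B (Python) =====
-- def repeating_length_from_start(window, input_string):
--     """Get the maximum repeating length of the input from the start of the window"""
--     if window == "":
--         return 0
--     s = window + input_string
--     i = 0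
--     n = len(input_string)
--     while i < n and s[i] == input_string[i]:
--         i += 1
--     return i
-- ===== Notes on version B (the rewrite author's own statement) =====
-- stated objective: faster
-- what changed: Replaced A's recursion that rebuilds a shifted window string (window[1:] + next char) on every matched character with a single index scan over window+input_string concatenated once.
import Mathlib
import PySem

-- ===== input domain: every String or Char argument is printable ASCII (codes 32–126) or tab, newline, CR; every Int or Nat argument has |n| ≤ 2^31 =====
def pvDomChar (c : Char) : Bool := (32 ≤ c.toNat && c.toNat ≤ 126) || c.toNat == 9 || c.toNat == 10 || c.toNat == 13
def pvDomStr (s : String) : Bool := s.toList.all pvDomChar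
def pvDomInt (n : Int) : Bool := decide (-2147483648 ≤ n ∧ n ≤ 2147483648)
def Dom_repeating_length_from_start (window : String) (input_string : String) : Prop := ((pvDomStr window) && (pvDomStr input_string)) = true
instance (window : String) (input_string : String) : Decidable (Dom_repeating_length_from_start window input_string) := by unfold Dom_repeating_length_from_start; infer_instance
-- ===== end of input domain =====

-- B replaces A's quadratic recursion (rebuilding the shifted window string each step)
-- by a single index scan over window+input concatenated once; objective: faster (asymptotic).


-- ===== PORT A =====
-- A's recursion over List Char: window[0] → w.head, window[1:] + input_string[0] → ws ++ [c],
-- input_string[1:] → cs (exact: the strings are nonempty on that branch).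
def pvARec : List Char → List Char → Int
  | [], _ => 0
  | _, [] => 0
  | a :: ws, c :: cs =>
    if a = c then 1 + pvARec (ws ++ [c]) cs else 0
termination_by w inp => inp.length

def repeating_length_from_start (window : String) (input_string : String) : Int :=
  pvARec window.toList input_string.toList

-- ===== PORT B =====
-- B: count matching prefix of s = window ++ input against input, by one scan.
def pvBScan : List Char → List Char → Int
  | a :: s, b :: inp => if a = b then 1 + pvBScan s inp else 0
  | _, _ => 0

def repeating_length_from_start_alt (window : String) (input_string : String) : Int :=
  if window = "" then 0
  else pvBScan (window.toList ++ input_string.toList) input_string.toList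

-- ===== PRECONDITION & SPEC =====
def Spec_repeating_length_from_start (window : String) (input_string : String) (out : Int) : Prop := out = repeating_length_from_start_alt window input_string
instance (window : String) (input_string : String) (out : Int) : Decidable (Spec_repeating_length_from_start window input_string out) := by unfold Spec_repeating_length_from_start; infer_instance

-- ===== CLAIM (what is proved, stated in full; the proofs are below) =====
def Claim_equal_repeating_length_from_start : Prop := ∀ (window : String) (input_string : String), Dom_repeating_length_from_start window input_string → Spec_repeating_length_from_start window input_string (repeating_length_from_start window input_string)

-- ===== LEMMAS AND PROOFS =====
theorem pvARec_eq_scan (inp : List Char) : ∀ (w : List Char), w ≠ [] →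
    pvARec w inp = pvBScan (w ++ inp) inp := by
  induction inp with
  | nil =>
    intro w hw
    cases w with
    | nil => exact absurd rfl hw
    | cons a ws => simp [pvARec, pvBScan]
  | cons b cs ih =>
    intro w hw
    cases w with
    | nil => exact absurd rfl hw
    | cons a ws =>
      simp only [pvARec, pvBScan, List.cons_append]
      by_cases h : a = b
      · simp only [h, if_true]
        have := ih (ws ++ [b]) (by simp)
        rw [this, List.append_assoc]
        simp
      · simp [h]

theorem repeating_length_from_start_spec : Claim_equal_repeating_length_from_start := by
  intro window input_string _
  unfold Spec_repeating_length_from_start repeating_length_from_start repeating_length_from_start_alt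
  by_cases hw : window = ""
  · subst hw
    cases input_string.toList with
    | nil => simp [pvARec]
    | cons c cs => simp [pvARec]
  · rw [if_neg hw]
    exact pvARec_eq_scan _ _ (fun h => hw (by
      have := congrArg String.ofList h
      simpa using this))
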